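-- pv_equiv track=rewrite | github.com/rasikasrimal/CompetitiveProgramming | MoraXtreme/Help Me Please.py | min_time_to_open_cage
-- ===== SOURCE A (Python) =====
-- def min_time_to_open_cage(l, p, q, s):
--     # Create a dictionary to store the last index of each character in the codeword
--     last_index = {}
--     time = 0
--
--     # Iterate through the codeword from right to left
--     for i in range(l - 1, -1, -1):
--         char = s[i]
--
--         # Check if the character is already in the last_index dictionary
--         if char in last_index:
--             # Calculate the time needed to duplicate the substring from the last index to the current index
--             duplicate_time = (last_index[char] - i) * q
--             time += duplicate_time
--
--             # Update the last index of the character to the current index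
--             last_index[char] = i
--         else:
--             # Calculate the time needed to add the character to the codeword
--             time += p
--
--             # Add the character to the last_index dictionary with the current index
--             last_index[char] = i
--
--     return time
-- ===== SOURCE B (Python) =====
-- def min_time_to_open_cage(l, p, q, s):
--     # One left-to-right pass recording each character's first and last index,
--     # then one pass over the distinct characters using the telescoping identity:
--     # the summed consecutive gaps for a character equal (last - first).
--     first = {}
--     last = {}
--     for i in range(l):
--         c = s[i]
--         if c not in first:
--             first[c] = i
--         last[c] = i
--     time = 0
--     for c in first:
--         time += p + (last[c] - first[c]) * q
--     return time
-- ===== Notes on version B (the rewrite author's own statement) =====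
-- stated objective: alternative
-- what changed: Instead of scanning right-to-left and accumulating q-weighted gaps between consecutive occurrences in one dict, B scans left-to-right building first/last index dicts and sums p + (last-first)*q per distinct character via the telescoping identity.
import Mathlib
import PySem

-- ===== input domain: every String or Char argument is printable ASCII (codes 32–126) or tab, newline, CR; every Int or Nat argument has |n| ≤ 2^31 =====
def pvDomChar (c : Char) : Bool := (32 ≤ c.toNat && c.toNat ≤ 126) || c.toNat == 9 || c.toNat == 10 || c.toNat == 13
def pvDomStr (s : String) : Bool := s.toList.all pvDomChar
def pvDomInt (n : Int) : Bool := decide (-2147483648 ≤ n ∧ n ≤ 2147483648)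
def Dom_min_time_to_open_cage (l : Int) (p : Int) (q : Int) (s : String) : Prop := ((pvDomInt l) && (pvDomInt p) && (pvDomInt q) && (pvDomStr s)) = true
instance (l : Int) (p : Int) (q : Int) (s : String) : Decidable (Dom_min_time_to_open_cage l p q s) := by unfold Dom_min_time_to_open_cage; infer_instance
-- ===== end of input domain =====

-- B replaces A's right-to-left single-dict gap accumulation by a left-to-right
-- first/last-index pass plus a per-distinct-character telescoped sum (objective: alternative).

-- ===== PORT A =====
def min_time_to_open_cage (l : Int) (p : Int) (q : Int) (s : String) : Int :=
  ((PySem.List.pyRange (l - 1) (-1) (-1)).foldl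
      (fun (st : PySem.Dict Char Int × Int) i =>
        -- char = s[i]; s[i] raises IndexError iff i ≥ len(s): excluded by Pre_, default never read there
        let ch := (PySem.Str.pyGet? s i).getD ' '
        if st.1.contains ch then
          (st.1.insert ch i, st.2 + (st.1.getD ch 0 - i) * q)
        else
          (st.1.insert ch i, st.2 + p))
      (PySem.Dict.empty, 0)).2

-- ===== PORT B =====
def min_time_to_open_cage_alt (l : Int) (p : Int) (q : Int) (s : String) : Int :=
  let fl := (PySem.List.pyRange 0 l 1).foldl
      (fun (st : PySem.Dict Char Int × PySem.Dict Char Int) i =>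
        -- c = s[i]; same IndexError domain as A, excluded by Pre_
        let c := (PySem.Str.pyGet? s i).getD ' '
        ((if st.1.contains c then st.1 else st.1.insert c i), st.2.insert c i))
      (PySem.Dict.empty, PySem.Dict.empty)
  fl.1.keys.foldl (fun t c => t + (p + (fl.2.getD c 0 - fl.1.getD c 0) * q)) 0

-- ===== PRECONDITION & SPEC =====
-- Pre_ excludes exactly the inputs where the Python A raises IndexError (s[i] with l > len(s)).
def Pre_min_time_to_open_cage (l : Int) (p : Int) (q : Int) (s : String) : Prop :=
  l ≤ (s.toList.length : Int)
instance (l : Int) (p : Int) (q : Int) (s : String) : Decidable (Pre_min_time_to_open_cage l p q s) := by unfold Pre_min_time_to_open_cage; infer_instance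

def pvWitness_min_time_to_open_cage : Int × Int × Int × String := (3, 2, 1, "aba")

def Spec_min_time_to_open_cage (l : Int) (p : Int) (q : Int) (s : String) (out : Int) : Prop := out = min_time_to_open_cage_alt l p q s
instance (l : Int) (p : Int) (q : Int) (s : String) (out : Int) : Decidable (Spec_min_time_to_open_cage l p q s out) := by unfold Spec_min_time_to_open_cage; infer_instance

-- ===== CLAIM (what is proved, stated in full; the proofs are below) =====
def Claim_equal_min_time_to_open_cage : Prop := ∀ (l : Int) (p : Int) (q : Int) (s : String), Dom_min_time_to_open_cage l p q s → Pre_min_time_to_open_cage l p q s → Spec_min_time_to_open_cage l p q s (min_time_to_open_cage l p q s)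

-- ===== LEMMAS AND PROOFS =====

-- first value recorded for character c in a pair list (first occurrence wins)
def pvFv : List (Char × Int) → Char → Option Int
  | [], _ => none
  | (c', i) :: tl, c => if c' = c then some i else pvFv tl c

-- last value recorded for character c in a pair list (last occurrence wins)
def pvLv : List (Char × Int) → Char → Option Int
  | [], _ => none
  | (c', i) :: tl, c =>
      match pvLv tl c with
      | some j => some j
      | none => if c' = c then some i else none

-- A's loop step on (dict, time), as a function of the (char, index) pair
def pvStepA (q p : Int) (st : PySem.Dict Char Int × Int) (pr : Char × Int) : PySem.Dict Char Int × Int :=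
  if st.1.contains pr.1 then
    (st.1.insert pr.1 pr.2, st.2 + (st.1.getD pr.1 0 - pr.2) * q)
  else
    (st.1.insert pr.1 pr.2, st.2 + p)

def pvAA (q p : Int) (ps : List (Char × Int)) : PySem.Dict Char Int × Int :=
  ps.foldr (fun pr st => pvStepA q p st pr) (PySem.Dict.empty, 0)

-- B's two dict-building steps
def pvFstep (d : PySem.Dict Char Int) (pr : Char × Int) : PySem.Dict Char Int :=
  if d.contains pr.1 then d else d.insert pr.1 pr.2
def pvLstep (d : PySem.Dict Char Int) (pr : Char × Int) : PySem.Dict Char Int :=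
  d.insert pr.1 pr.2

-- the per-character contribution and the closed-form total
def pvG (q p : Int) (ps : List (Char × Int)) (c : Char) : Int :=
  p + ((pvLv ps c).getD 0 - (pvFv ps c).getD 0) * q
def pvSum (q p : Int) (ps : List (Char × Int)) : Int :=
  ∑ c ∈ (ps.map Prod.fst).toFinset, pvG q p ps c

-- the common pair list both ports traverse
def pvPs (l : Int) (s : String) : List (Char × Int) :=
  (PySem.List.pyRange 0 l 1).map (fun i => ((PySem.Str.pyGet? s i).getD ' ', i))

theorem pvFv_eq_none (ps : List (Char × Int)) (c : Char) :
    pvFv ps c = none ↔ c ∉ ps.map Prod.fst := by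
  induction ps with
  | nil => simp [pvFv]
  | cons pr tl ih =>
    obtain ⟨c', i⟩ := pr
    by_cases h : c' = c
    · subst h; simp [pvFv]
    · simp [pvFv, h, ih, Ne.symm h]

theorem pvLv_eq_none (ps : List (Char × Int)) (c : Char) :
    pvLv ps c = none ↔ c ∉ ps.map Prod.fst := by
  induction ps with
  | nil => simp [pvLv]
  | cons pr tl ih =>
    obtain ⟨c', i⟩ := pr
    cases hl : pvLv tl c with
    | some j =>
      have : c ∈ tl.map Prod.fst := by
        by_contra hc; rw [← ih] at hc; simp [hl] at hc
      simp [pvLv, hl, this]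
    | none =>
      by_cases h : c' = c
      · subst h; simp [pvLv, hl]
      · have hm : c ∉ tl.map Prod.fst := ih.mp hl
        simp only [pvLv, hl, h, List.map_cons, List.mem_cons]
        constructor
        · intro _ hc; rcases hc with hc | hc
          · exact h hc.symm
          · exact hm hc
        · intro _; simp

theorem pvFv_cons (c' : Char) (i : Int) (tl : List (Char × Int)) (c : Char) :
    pvFv ((c', i) :: tl) c = if c' = c then some i else pvFv tl c := rfl

theorem pvLv_cons_mem (c' : Char) (i : Int) (tl : List (Char × Int)) (c : Char)
    (h : c ∈ tl.map Prod.fst) : pvLv ((c', i) :: tl) c = pvLv tl c := by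
  cases hl : pvLv tl c with
  | some j => simp [pvLv, hl]
  | none => rw [pvLv_eq_none] at hl; exact (hl h).elim

-- the main invariant: A's fold computes the telescoped total and its dict holds first values
theorem pvCore (q p : Int) (ps : List (Char × Int)) :
    (pvAA q p ps).2 = pvSum q p ps ∧ ∀ c, (pvAA q p ps).1.get? c = pvFv ps c := by
  induction ps with
  | nil =>
    constructor
    · simp [pvAA, pvSum]
    · intro c; simp [pvAA, pvFv, PySem.Dict.get?_empty]
  | cons pr tl ih =>
    obtain ⟨c, i⟩ := pr
    obtain ⟨ih1, ih2⟩ := ih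
    have hAA : pvAA q p ((c, i) :: tl) = pvStepA q p (pvAA q p tl) (c, i) := rfl
    have hcont : (pvAA q p tl).1.contains c = (pvFv tl c).isSome := by
      rw [PySem.Dict.contains_eq_isSome_get?, ih2]
    by_cases hm : c ∈ tl.map Prod.fst
    · -- c already occurs in tl
      obtain ⟨f, hf⟩ : ∃ f, pvFv tl c = some f := by
        rcases h : pvFv tl c with _ | f
        · rw [pvFv_eq_none] at h; exact (h hm).elim
        · exact ⟨f, rfl⟩
      have hc : (pvAA q p tl).1.contains c = true := by rw [hcont, hf]; rfl
      have hstep : pvAA q p ((c, i) :: tl) =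
          ((pvAA q p tl).1.insert c i, (pvAA q p tl).2 + ((pvAA q p tl).1.getD c 0 - i) * q) := by
        rw [hAA]; simp [pvStepA, hc]
      have hgd : (pvAA q p tl).1.getD c 0 = f := by
        rw [PySem.Dict.getD_eq_get?_getD, ih2, hf]; rfl
      constructor
      · rw [hstep]; simp only []
        rw [ih1, hgd]
        -- sum side
        have hS : ((( (c, i) :: tl).map Prod.fst).toFinset : Finset Char)
            = (tl.map Prod.fst).toFinset := by
          simp [List.toFinset_cons, Finset.insert_eq_self.mpr (List.mem_toFinset.mpr hm)]
        have hGne : ∀ c', c' ≠ c → pvG q p ((c, i) :: tl) c' = pvG q p tl c' := by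
          intro c' hne
          have h1 : pvFv ((c, i) :: tl) c' = pvFv tl c' := by
            rw [pvFv_cons]; simp [Ne.symm hne]
          have h2 : pvLv ((c, i) :: tl) c' = pvLv tl c' := by
            cases hl : pvLv tl c' with
            | some j => simp [pvLv, hl]
            | none => simp [pvLv, hl, Ne.symm hne]
          simp [pvG, h1, h2]
        have hcmem : c ∈ (tl.map Prod.fst).toFinset := List.mem_toFinset.mpr hm
        have hGc_new : pvG q p ((c, i) :: tl) c = p + ((pvLv tl c).getD 0 - i) * q := by
          rw [pvG, pvLv_cons_mem _ _ _ _ hm, pvFv_cons]; simp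
        have hGc_old : pvG q p tl c = p + ((pvLv tl c).getD 0 - f) * q := by
          rw [pvG, hf]; rfl
        unfold pvSum
        rw [hS]
        rw [← Finset.sum_erase_add _ _ hcmem, ← Finset.sum_erase_add _ _ hcmem]
        have : ∀ x ∈ (tl.map Prod.fst).toFinset.erase c,
            pvG q p ((c, i) :: tl) x = pvG q p tl x := by
          intro x hx
          exact hGne x (Finset.ne_of_mem_erase hx)
        rw [Finset.sum_congr rfl this, hGc_new, hGc_old]
        ring
      · intro c'
        rw [hstep]; simp only []
        rw [PySem.Dict.get?_insert, ih2, pvFv_cons]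
        by_cases h : c' = c
        · subst h; simp
        · simp [h, Ne.symm h]
    · -- c does not occur in tl
      have hfv : pvFv tl c = none := (pvFv_eq_none tl c).mpr hm
      have hlv : pvLv tl c = none := (pvLv_eq_none tl c).mpr hm
      have hc : (pvAA q p tl).1.contains c = false := by rw [hcont, hfv]; rfl
      have hstep : pvAA q p ((c, i) :: tl) =
          ((pvAA q p tl).1.insert c i, (pvAA q p tl).2 + p) := by
        rw [hAA]; simp [pvStepA, hc]
      constructor
      · rw [hstep]; simp only []
        rw [ih1]
        have hcmem : c ∉ (tl.map Prod.fst).toFinset := fun h => hm (List.mem_toFinset.mp h)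
        have hGne : ∀ c', c' ≠ c → pvG q p ((c, i) :: tl) c' = pvG q p tl c' := by
          intro c' hne
          have h1 : pvFv ((c, i) :: tl) c' = pvFv tl c' := by
            rw [pvFv_cons]; simp [Ne.symm hne]
          have h2 : pvLv ((c, i) :: tl) c' = pvLv tl c' := by
            cases hl : pvLv tl c' with
            | some j => simp [pvLv, hl]
            | none => simp [pvLv, hl, Ne.symm hne]
          simp [pvG, h1, h2]
        have hGc : pvG q p ((c, i) :: tl) c = p := by
          rw [pvG, pvFv_cons, pvLv]; simp [hlv]
        unfold pvSum
        rw [List.map_cons, List.toFinset_cons, Finset.sum_insert hcmem, hGc]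
        have : ∀ x ∈ (tl.map Prod.fst).toFinset,
            pvG q p ((c, i) :: tl) x = pvG q p tl x := by
          intro x hx
          exact hGne x (fun hxc => hcmem (hxc ▸ hx))
        rw [Finset.sum_congr rfl this]
        ring
      · intro c'
        rw [hstep]; simp only []
        rw [PySem.Dict.get?_insert, ih2, pvFv_cons]
        by_cases h : c' = c
        · subst h; simp
        · simp [h, Ne.symm h]

-- B-side dict characterisations
theorem pvFd_get? (ps : List (Char × Int)) (d : PySem.Dict Char Int) (c : Char) :
    (ps.foldl pvFstep d).get? c = (d.get? c).or (pvFv ps c) := by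
  induction ps generalizing d with
  | nil => simp [pvFv]
  | cons pr tl ih =>
    obtain ⟨c', i⟩ := pr
    rw [List.foldl_cons]
    cases hd : d.contains c' with
    | true =>
      have : pvFstep d (c', i) = d := by simp [pvFstep, hd]
      rw [this, ih, pvFv_cons]
      by_cases h : c' = c
      · subst h
        obtain ⟨v, hv⟩ : ∃ v, d.get? c' = some v := by
          rw [PySem.Dict.contains_eq_isSome_get?] at hd
          rcases h : d.get? c' with _ | v
          · rw [h] at hd; simp at hd
          · exact ⟨v, rfl⟩
        simp [hv]
      · simp [h]
    | false =>
      have : pvFstep d (c', i) = d.insert c' i := by simp [pvFstep, hd]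
      rw [this, ih, PySem.Dict.get?_insert]
      have hdn : d.get? c' = none := by
        rw [PySem.Dict.contains_eq_isSome_get?] at hd
        rcases h : d.get? c' with _ | v
        · rfl
        · rw [h] at hd; simp at hd
      rw [pvFv_cons]
      by_cases h : c = c'
      · subst h; simp [hdn]
      · simp [h, Ne.symm h]

theorem pvLd_get? (ps : List (Char × Int)) (d : PySem.Dict Char Int) (c : Char) :
    (ps.foldl pvLstep d).get? c = (pvLv ps c).or (d.get? c) := by
  induction ps generalizing d with
  | nil => simp [pvLv]
  | cons pr tl ih =>
    obtain ⟨c', i⟩ := pr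
    rw [List.foldl_cons]
    have : pvLstep d (c', i) = d.insert c' i := rfl
    rw [this, ih, PySem.Dict.get?_insert]
    cases hl : pvLv tl c with
    | some j => simp [pvLv, hl]
    | none =>
      by_cases h : c = c'
      · subst h; simp [pvLv, hl]
      · simp [pvLv, hl, h, Ne.symm h]

theorem pvFd_mem_keys (ps : List (Char × Int)) (d : PySem.Dict Char Int) (c : Char) :
    c ∈ (ps.foldl pvFstep d).keys ↔ c ∈ d.keys ∨ c ∈ ps.map Prod.fst := by
  induction ps generalizing d with
  | nil => simp
  | cons pr tl ih =>
    obtain ⟨c', i⟩ := pr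
    rw [List.foldl_cons]
    cases hd : d.contains c' with
    | true =>
      have hstep : pvFstep d (c', i) = d := by simp [pvFstep, hd]
      rw [hstep, ih]
      have hc' : c' ∈ d.keys := (PySem.Dict.contains_iff_mem_keys d c').mp hd
      constructor
      · rintro (h | h)
        · exact Or.inl h
        · exact Or.inr (by simp [h])
      · rintro (h | h)
        · exact Or.inl h
        · rw [List.map_cons, List.mem_cons] at h
          rcases h with h | h
          · exact Or.inl (h ▸ hc')
          · exact Or.inr h
    | false =>
      have hstep : pvFstep d (c', i) = d.insert c' i := by simp [pvFstep, hd]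
      rw [hstep, ih]
      rw [PySem.Dict.mem_keys_insert]
      constructor
      · rintro ((h | h) | h)
        · exact Or.inr (by simp [h])
        · exact Or.inl h
        · exact Or.inr (by simp [h])
      · rintro (h | h)
        · exact Or.inl (Or.inr h)
        · rw [List.map_cons, List.mem_cons] at h
          rcases h with h | h
          · exact Or.inl (Or.inl h)
          · exact Or.inr h

theorem pvFd_nodup_keys (ps : List (Char × Int)) (d : PySem.Dict Char Int)
    (hd : d.keys.Nodup) : (ps.foldl pvFstep d).keys.Nodup := by
  induction ps generalizing d with
  | nil => exact hd
  | cons pr tl ih =>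
    rw [List.foldl_cons]
    apply ih
    unfold pvFstep
    split
    · exact hd
    · exact PySem.Dict.nodup_keys_insert _ _ _ hd

-- port A in terms of pvAA
theorem pvPortA (l p q : Int) (s : String) :
    min_time_to_open_cage l p q s = (pvAA q p (pvPs l s)).2 := by
  unfold min_time_to_open_cage pvAA pvPs
  rw [PySem.List.pyRange_neg_one_eq_reverse]
  have h0 : (-1 : Int) + 1 = 0 := by norm_num
  have h1 : l - 1 + 1 = l := by ring
  rw [h0, h1, ← List.foldl_reverse, ← List.map_reverse, List.foldl_map]
  rfl

-- port B in terms of the two dict folds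
theorem pvPortB (l p q : Int) (s : String) :
    min_time_to_open_cage_alt l p q s =
      ((pvPs l s).foldl pvFstep PySem.Dict.empty).keys.foldl
        (fun t c => t + (p + (((pvPs l s).foldl pvLstep PySem.Dict.empty).getD c 0
                      - ((pvPs l s).foldl pvFstep PySem.Dict.empty).getD c 0) * q)) 0 := by
  have hmap : (pvPs l s).foldl (fun (st : PySem.Dict Char Int × PySem.Dict Char Int) pr =>
          (pvFstep st.1 pr, pvLstep st.2 pr)) (PySem.Dict.empty, PySem.Dict.empty)
        = ((pvPs l s).foldl pvFstep PySem.Dict.empty, (pvPs l s).foldl pvLstep PySem.Dict.empty) := by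
    rw [PySem.List.foldl_prod_mk]
  calc min_time_to_open_cage_alt l p q s
      = (let fl := (pvPs l s).foldl (fun (st : PySem.Dict Char Int × PySem.Dict Char Int) pr =>
            (pvFstep st.1 pr, pvLstep st.2 pr)) (PySem.Dict.empty, PySem.Dict.empty);
         fl.1.keys.foldl (fun t c => t + (p + (fl.2.getD c 0 - fl.1.getD c 0) * q)) 0) := by
        unfold min_time_to_open_cage_alt pvPs
        rw [List.foldl_map]
        rfl
    _ = _ := by rw [hmap]

-- B equals the closed-form total
theorem pvPortB_sum (l p q : Int) (s : String) :
    min_time_to_open_cage_alt l p q s = pvSum q p (pvPs l s) := by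
  rw [pvPortB]
  rw [PySem.List.foldl_add]
  set ps := pvPs l s with hps
  have hnd : ((ps.foldl pvFstep PySem.Dict.empty).keys).Nodup :=
    pvFd_nodup_keys ps PySem.Dict.empty (by simp [PySem.Dict.keys_empty])
  have hmem : ∀ c, c ∈ (ps.foldl pvFstep PySem.Dict.empty).keys ↔ c ∈ ps.map Prod.fst := by
    intro c
    rw [pvFd_mem_keys]
    simp [PySem.Dict.keys_empty]
  have hset : ((ps.foldl pvFstep PySem.Dict.empty).keys).toFinset = (ps.map Prod.fst).toFinset := by
    apply Finset.ext
    intro c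
    simp only [List.mem_toFinset]
    exact hmem c
  have hg : ∀ c, (p + ((ps.foldl pvLstep PySem.Dict.empty).getD c 0
                      - (ps.foldl pvFstep PySem.Dict.empty).getD c 0) * q) = pvG q p ps c := by
    intro c
    rw [pvG, PySem.Dict.getD_eq_get?_getD, PySem.Dict.getD_eq_get?_getD,
        pvFd_get?, pvLd_get?, PySem.Dict.get?_empty]
    simp
  rw [List.map_congr_left (fun c _ => hg c)]
  rw [← List.sum_toFinset _ hnd, hset]
  simp [pvSum]

-- ===== VERDICT (by name: the statement is the Claim_ definition above) =====
theorem min_time_to_open_cage_spec : Claim_equal_min_time_to_open_cage := by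
  intro l p q s _ _
  unfold Spec_min_time_to_open_cage
  rw [pvPortA, pvPortB_sum, (pvCore q p (pvPs l s)).1]
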